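-- pv_equiv track=rewrite | github.com/dongyeoppp/Jungle_TIL | programmers/programmers_250136.py | solution
-- ===== SOURCE A (Python) =====
-- def solution(land):
--     def dfs(low,col,visited,count):
--         visited[low][col] = True
--         dx = [1,-1,0,0]
--         dy = [0,0,1,-1]
--         for i in range(4):
--             x = dx[i] + low
--             y = dy[i] + col
--             if 0 <= x <= len(land)-1 and 0 <= y <= len(land[0])-1 and not visited[x][y] and land[x][y] == 1:
--                 count = max(dfs(x,y,visited,count+1),count)
--         return count
--
--     result = 0
--     for i in range(len(land[0])):
--         visited = [[False] * len(land[0]) for k in range(len(land))]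
--         answer = 0
--         for j in range(len(land)):
--             if land[j][i] == 1 and not visited[j][i]:
--                 answer += dfs(j,i,visited,1)
--         result = max(answer,result)
--
--     return result
-- ===== SOURCE B (Python) =====
-- def solution(land):
--     rows, cols = len(land), len(land[0])
--     best = 0
--     for i in range(cols):
--         visited = [[False] * cols for _ in range(rows)]
--         ans = 0
--         for j in range(rows):
--             if land[j][i] == 1 and not visited[j][i]:
--                 stack = [(j, i)]
--                 while stack:
--                     r, c = stack.pop()
--                     if visited[r][c]:
--                         continue
--                     visited[r][c] = True
--                     ans += 1
--                     for x, y in ((r, c - 1), (r, c + 1), (r - 1, c), (r + 1, c)):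
--                         if 0 <= x < rows and 0 <= y < cols and not visited[x][y] and land[x][y] == 1:
--                             stack.append((x, y))
--         if ans > best:
--             best = ans
--     return best
-- ===== Notes on version B (the rewrite author's own statement) =====
-- stated objective: alternative
-- what changed: The recursive DFS that threads a count through max() calls is replaced by an explicit-stack flood fill that counts cells as they are popped and marked, with no counter threaded through recursion.
import Mathlib
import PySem

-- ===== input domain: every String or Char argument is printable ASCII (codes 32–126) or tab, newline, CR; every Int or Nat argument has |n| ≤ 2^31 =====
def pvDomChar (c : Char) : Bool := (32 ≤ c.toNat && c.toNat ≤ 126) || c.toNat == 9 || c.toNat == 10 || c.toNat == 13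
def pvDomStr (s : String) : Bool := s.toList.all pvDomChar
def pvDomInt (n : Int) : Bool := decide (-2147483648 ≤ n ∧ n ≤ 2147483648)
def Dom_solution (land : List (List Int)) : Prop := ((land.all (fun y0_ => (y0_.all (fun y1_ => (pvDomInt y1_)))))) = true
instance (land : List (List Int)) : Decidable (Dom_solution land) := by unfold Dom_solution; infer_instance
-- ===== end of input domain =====

-- B replaces A's recursive count-threading DFS by an explicit-stack flood fill that
-- counts marks directly (alternative decomposition; same asymptotic cost).


-- ===== PORT A =====
-- shared small helpers: matrix read/write at int coordinates.  All reads/writes in both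
-- Pythons happen under in-range guards (and Pre_ makes the grid rectangular enough),
-- so getD / toNat are exact there.
def matGet (v : List (List Bool)) (r c : Int) : Bool :=
  (v.getD r.toNat []).getD c.toNat false

def matSet (v : List (List Bool)) (r c : Int) : List (List Bool) :=
  v.set r.toNat ((v.getD r.toNat []).set c.toNat true)

def gridGet (g : List (List Int)) (r c : Int) : Int :=
  (g.getD r.toNat []).getD c.toNat 0

-- A's dfs; `fuel` only makes the recursion total (one unit per call; every call marks a
-- previously unmarked cell, so rows*cols+1 never runs out).  Python mutates `visited`
-- and returns `count`; the port returns the pair.  dx/dy are zipped into one list.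
def dfsA (g : List (List Int)) : Nat → Int → Int → List (List Bool) → Int → Int × List (List Bool)
  | 0, _, _, visited, count => (count, visited)
  | fuel+1, low, col, visited, count =>
    let visited := matSet visited low col
    List.foldl (fun (st : Int × List (List Bool)) (d : Int × Int) =>
      let x := d.1 + low
      let y := d.2 + col
      if 0 ≤ x ∧ x ≤ (g.length : Int) - 1 ∧ 0 ≤ y ∧ y ≤ ((g.headD []).length : Int) - 1
          ∧ matGet st.2 x y = false ∧ gridGet g x y = 1 then
        let r := dfsA g fuel x y st.2 (st.1 + 1)
        (max r.1 st.1, r.2)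
      else st) (count, visited) [(1,0),(-1,0),(0,1),(0,-1)]

def solution (land : List (List Int)) : Int :=
  let rows := land.length
  let cols := (land.headD []).length
  (PySem.List.pyRange 0 (cols : Int) 1).foldl (fun result i =>
    let p := (PySem.List.pyRange 0 (rows : Int) 1).foldl
      (fun (st : Int × List (List Bool)) j =>
        if gridGet land j i = 1 ∧ matGet st.2 j i = false then
          let r := dfsA land (rows * cols + 1) j i st.2 1
          (st.1 + r.1, r.2)
        else st)
      ((0 : Int), List.replicate rows (List.replicate cols false))
    max p.1 result) 0

-- ===== PORT B =====
-- B's while-loop over an explicit stack; head of the list is the top of the stack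
-- (Python appends/pops at the end, so the four candidates, appended in textual order,
-- are prepended reversed).  `fuel` only totalises the loop.
def loopB (g : List (List Int)) : Nat → List (Int × Int) → List (List Bool) → Int → Int × List (List Bool)
  | 0, _, visited, ans => (ans, visited)
  | fuel+1, stack, visited, ans =>
    match stack with
    | [] => (ans, visited)
    | (r, c) :: stack =>
      if matGet visited r c then loopB g fuel stack visited ans
      else
        let visited := matSet visited r c
        let ps := ([(r, c-1), (r, c+1), (r-1, c), (r+1, c)] : List (Int × Int)).filter
          (fun q => decide (0 ≤ q.1 ∧ q.1 < (g.length : Int) ∧ 0 ≤ q.2 ∧ q.2 < ((g.headD []).length : Int))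
            && !matGet visited q.1 q.2 && decide (gridGet g q.1 q.2 = 1))
        loopB g fuel (ps.reverse ++ stack) visited (ans + 1)

def solution_alt (land : List (List Int)) : Int :=
  let rows := land.length
  let cols := (land.headD []).length
  (PySem.List.pyRange 0 (cols : Int) 1).foldl (fun best i =>
    let p := (PySem.List.pyRange 0 (rows : Int) 1).foldl
      (fun (st : Int × List (List Bool)) j =>
        if gridGet land j i = 1 ∧ matGet st.2 j i = false then
          loopB land (5 * (rows * cols) + 1) [(j, i)] st.2 st.1
        else st)
      ((0 : Int), List.replicate rows (List.replicate cols false))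
    if p.1 > best then p.1 else best) 0

-- ===== PRECONDITION & SPEC =====
-- A raises IndexError on `land == []` (it reads land[0]) and whenever some row is
-- shorter than row 0 (it reads land[j][i] for every j and every i < len(land[0]));
-- Pre_ excludes exactly those inputs.
def Pre_solution (land : List (List Int)) : Prop :=
  land ≠ [] ∧ ∀ row ∈ land, (land.headD []).length ≤ row.length

instance (land : List (List Int)) : Decidable (Pre_solution land) := by
  unfold Pre_solution; infer_instance

def pvWitness_solution : List (List Int) := [[1, 0, 1], [1, 1, 0]]

def Spec_solution (land : List (List Int)) (out : Int) : Prop := out = solution_alt land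
instance (land : List (List Int)) (out : Int) : Decidable (Spec_solution land out) := by unfold Spec_solution; infer_instance

-- ===== CLAIM (what is proved, stated in full; the proofs are below) =====
def Claim_equal_solution : Prop := ∀ (land : List (List Int)), Dom_solution land → Pre_solution land → Spec_solution land (solution land)

-- ===== LEMMAS AND PROOFS =====

-- generic list lemmas -------------------------------------------------------
theorem pvGetD_set_self {α : Type} (d : α) (l : List α) (a : α) (i : Nat) (h : i < l.length) :
    (l.set i a).getD i d = a := by
  induction l generalizing i with
  | nil => simp at h
  | cons b t ih =>
    cases i with
    | zero => simp [List.getD]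
    | succ m => simpa [List.getD] using ih m (by simpa using h)

theorem pvGetD_set_ne {α : Type} (d : α) (l : List α) (a : α) (i n : Nat) (h : n ≠ i) :
    (l.set i a).getD n d = l.getD n d := by
  induction l generalizing i n with
  | nil => simp
  | cons b t ih =>
    cases i with
    | zero =>
      cases n with
      | zero => omega
      | succ k => simp [List.getD]
    | succ j =>
      cases n with
      | zero => simp [List.getD]
      | succ k => simpa [List.getD] using ih j k (by omega)

theorem pvMem_set {α : Type} (l : List α) (i : Nat) (a b : α) (h : b ∈ l.set i a) :
    b = a ∨ b ∈ l := by
  induction l generalizing i with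
  | nil => simp at h
  | cons c t ih =>
    cases i with
    | zero =>
      rcases List.mem_cons.1 h with h1 | h1
      · exact Or.inl h1
      · exact Or.inr (List.mem_cons_of_mem _ h1)
    | succ j =>
      rcases List.mem_cons.1 h with h1 | h1
      · exact Or.inr (h1 ▸ List.mem_cons_self ..)
      · rcases ih j h1 with h2 | h2
        · exact Or.inl h2
        · exact Or.inr (List.mem_cons_of_mem _ h2)

theorem pvSum_set (l : List Nat) (i : Nat) (b : Nat) (h : i < l.length) :
    (l.set i b).sum + l.getD i 0 = l.sum + b := by
  induction l generalizing i with
  | nil => simp at h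
  | cons a t ih =>
    cases i with
    | zero => simp [List.getD]; omega
    | succ j =>
      have := ih j (by simpa using h)
      simp only [List.set, List.sum_cons, List.getD, List.getElem?_cons_succ]
      simp only [List.getD] at this
      omega

theorem pvSum_le_mul (l : List Nat) (C : Nat) (h : ∀ x ∈ l, x ≤ C) : l.sum ≤ l.length * C := by
  induction l with
  | nil => simp
  | cons a t ih =>
    have h1 := h a (List.mem_cons_self ..)
    have h2 := ih (fun x hx => h x (List.mem_cons_of_mem _ hx))
    simp only [List.sum_cons, List.length_cons]
    calc a + t.sum ≤ C + t.length * C := by omega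
    _ = (t.length + 1) * C := by ring

theorem pvGetD_map {α β : Type} (f : α → β) (l : List α) (i : Nat) (d : α) :
    (l.map f).getD i (f d) = f (l.getD i d) := by
  induction l generalizing i with
  | nil => simp [List.getD]
  | cons a t ih =>
    cases i with
    | zero => simp [List.getD]
    | succ j => simpa [List.getD] using ih j

-- row-level lemmas ----------------------------------------------------------
theorem pvRowSet_count (row : List Bool) (n : Nat) (h : n < row.length)
    (hf : row.getD n false = false) :
    (row.set n true).count false + 1 = row.count false := by
  induction row generalizing n with
  | nil => simp at h
  | cons a l ih =>
    cases n with
    | zero => simp_all [List.getD]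
    | succ m =>
      simp only [List.set, List.count_cons]
      have := ih m (by simpa using h) (by simpa [List.getD] using hf)
      omega

-- core notions --------------------------------------------------------------
def Shape (v : List (List Bool)) (R C : Nat) : Prop :=
  v.length = R ∧ ∀ row ∈ v, row.length = C

def Mle (v w : List (List Bool)) : Prop :=
  ∀ r c : Int, matGet v r c = true → matGet w r c = true

def fc (v : List (List Bool)) : Nat := (v.map (fun row => row.count false)).sum

def InR (g : List (List Int)) (p : Int × Int) : Prop :=
  0 ≤ p.1 ∧ p.1 < (g.length : Int) ∧ 0 ≤ p.2 ∧ p.2 < ((g.headD []).length : Int)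

theorem pvMle_refl (v : List (List Bool)) : Mle v v := fun _ _ h => h

theorem pvMle_trans {u v w : List (List Bool)} (h1 : Mle u v) (h2 : Mle v w) : Mle u w :=
  fun r c h => h2 r c (h1 r c h)

-- matrix-level lemmas -------------------------------------------------------
theorem pvBounds (g : List (List Int)) (v : List (List Bool))
    (h : Shape v g.length (g.headD []).length) (p : Int × Int) (hin : InR g p) :
    p.1.toNat < v.length ∧ p.2.toNat < (v.getD p.1.toNat []).length := by
  obtain ⟨h1, hrows⟩ := h
  obtain ⟨ha, hb, hcc, hd⟩ := hin
  have hr : p.1.toNat < v.length := by omega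
  refine ⟨hr, ?_⟩
  have hm : v.getD p.1.toNat [] ∈ v := by
    have : v.getD p.1.toNat [] = v[p.1.toNat] := List.getD_eq_getElem v [] hr
    rw [this]; exact List.getElem_mem _
  have := hrows _ hm
  omega

theorem pvMle_matSet (v : List (List Bool)) (r c : Int) : Mle v (matSet v r c) := by
  intro r' c' h
  unfold matGet matSet at *
  by_cases hi : r'.toNat = r.toNat
  · by_cases hr : r.toNat < v.length
    · rw [hi, pvGetD_set_self _ _ _ _ hr]
      by_cases hj : c'.toNat = c.toNat
      · rw [hj]
        by_cases hc : c.toNat < (v.getD r.toNat []).length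
        · exact pvGetD_set_self _ _ _ _ hc
        · rw [List.set_eq_of_length_le (by omega)]
          rw [hi, hj] at h; exact h
      · rw [pvGetD_set_ne _ _ _ _ _ hj]
        rw [hi] at h; exact h
    · rw [List.set_eq_of_length_le (le_of_not_gt hr)]; exact h
  · rw [pvGetD_set_ne _ _ _ _ _ hi]; exact h

theorem pvShape_matSet (v : List (List Bool)) (r c : Int) (R C : Nat)
    (h : Shape v R C) : Shape (matSet v r c) R C := by
  by_cases hr : r.toNat < v.length
  · refine ⟨by simpa [matSet] using h.1, ?_⟩
    intro row hm
    rcases pvMem_set _ _ _ _ hm with h1 | h1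
    · subst h1
      rw [List.length_set]
      have hmem : v.getD r.toNat [] ∈ v := by
        have : v.getD r.toNat [] = v[r.toNat] := List.getD_eq_getElem v [] hr
        rw [this]; exact List.getElem_mem _
      exact h.2 _ hmem
    · exact h.2 _ h1
  · unfold matSet
    rw [List.set_eq_of_length_le (le_of_not_gt hr)]
    exact h

theorem pvFc_matSet_eq (v : List (List Bool)) (r c : Int)
    (hr : r.toNat < v.length) (hc : c.toNat < (v.getD r.toNat []).length)
    (hun : matGet v r c = false) :
    fc (matSet v r c) + 1 = fc v := by
  unfold fc matSet
  rw [List.map_set]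
  have hrow := pvRowSet_count (v.getD r.toNat []) c.toNat hc (by unfold matGet at hun; exact hun)
  have hsum := pvSum_set (v.map (fun row => row.count false)) r.toNat
      (((v.getD r.toNat []).set c.toNat true).count false) (by simpa using hr)
  have hget : (v.map (fun row => row.count false)).getD r.toNat 0
      = (v.getD r.toNat []).count false := by
    have := pvGetD_map (fun row : List Bool => row.count false) v r.toNat []
    simpa using this
  rw [hget] at hsum
  omega

theorem pvFc_pos (v : List (List Bool)) (r c : Int)
    (hr : r.toNat < v.length) (hc : c.toNat < (v.getD r.toNat []).length)
    (hun : matGet v r c = false) : 1 ≤ fc v := by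
  have := pvFc_matSet_eq v r c hr hc hun
  omega

theorem pvFc_le (v : List (List Bool)) (R C : Nat) (h : Shape v R C) : fc v ≤ R * C := by
  unfold fc
  have hlen : (v.map (fun row => row.count false)).length = R := by simpa using h.1
  have hbound : ∀ x ∈ v.map (fun row => row.count false), x ≤ C := by
    intro x hx
    rcases List.mem_map.1 hx with ⟨row, hrow, rfl⟩
    calc row.count false ≤ row.length := List.count_le_length
    _ = C := h.2 _ hrow
  have := pvSum_le_mul _ C hbound
  rw [hlen] at this
  exact this

theorem pvShape_init (g : List (List Int)) :
    Shape (List.replicate g.length (List.replicate (g.headD []).length false))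
      g.length (g.headD []).length := by
  refine ⟨by simp, ?_⟩
  intro row hm
  rw [List.eq_of_mem_replicate hm]
  simp

-- A-side fold body and the abstract per-seed step ---------------------------
def dbody (g : List (List Int)) (f : Nat) (low col : Int) :
    Int × List (List Bool) → Int × Int → Int × List (List Bool) := fun st d =>
  let x := d.1 + low
  let y := d.2 + col
  if 0 ≤ x ∧ x ≤ (g.length : Int) - 1 ∧ 0 ≤ y ∧ y ≤ ((g.headD []).length : Int) - 1
      ∧ matGet st.2 x y = false ∧ gridGet g x y = 1 then
    let r := dfsA g f x y st.2 (st.1 + 1)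
    (max r.1 st.1, r.2)
  else st

theorem pvDfsA_succ (g : List (List Int)) (f : Nat) (low col : Int)
    (v : List (List Bool)) (count : Int) :
    dfsA g (f + 1) low col v count
      = List.foldl (dbody g f low col) (count, matSet v low col) [(1,0),(-1,0),(0,1),(0,-1)] := rfl

def stepS (g : List (List Int)) (st : Int × List (List Bool)) (s : Int × Int) :
    Int × List (List Bool) :=
  if matGet st.2 s.1 s.2 then st else dfsA g (fc st.2) s.1 s.2 st.2 (st.1 + 1)

-- characterisation of A's dfs -----------------------------------------------
theorem pvFold_char (g : List (List Int)) (m k : Nat) (hkm : k ≤ m)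
    (H : ∀ (v : List (List Bool)) (low col : Int),
      Shape v g.length (g.headD []).length → InR g (low, col) →
      matGet v low col = false → fc v ≤ m →
      ∃ w, Shape w g.length (g.headD []).length ∧ Mle v w ∧ fc w < fc v ∧
        ∀ (fuel : Nat) (count : Int), fc v ≤ fuel →
          dfsA g fuel low col v count = (count + (fc v : Int) - (fc w : Int) - 1, w)) :
    ∀ (ds : List (Int × Int)) (u : List (List Bool)) (low col : Int),
      Shape u g.length (g.headD []).length → fc u ≤ k →
      ∃ w, Shape w g.length (g.headD []).length ∧ Mle u w ∧ fc w ≤ fc u ∧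
        ∀ (f : Nat) (c₀ : Int), k ≤ f →
          List.foldl (dbody g f low col) (c₀, u) ds = (c₀ + (fc u : Int) - (fc w : Int), w) := by
  intro ds
  induction ds with
  | nil =>
    intro u low col hs hk
    exact ⟨u, hs, pvMle_refl u, le_refl _, by intro f c₀ hf; simp⟩
  | cons d ds ih =>
    intro u low col hs hk
    by_cases hQ : 0 ≤ d.1 + low ∧ d.1 + low ≤ (g.length : Int) - 1 ∧ 0 ≤ d.2 + col
        ∧ d.2 + col ≤ ((g.headD []).length : Int) - 1
        ∧ matGet u (d.1 + low) (d.2 + col) = false ∧ gridGet g (d.1 + low) (d.2 + col) = 1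
    · obtain ⟨hq1, hq2, hq3, hq4, hq5, hq6⟩ := hQ
      have hin : InR g (d.1 + low, d.2 + col) := ⟨hq1, by omega, hq3, by omega⟩
      obtain ⟨w₁, hw₁s, hw₁m, hw₁lt, hw₁f⟩ := H u (d.1 + low) (d.2 + col) hs hin hq5 (le_trans hk hkm)
      obtain ⟨w, hws, hwm, hwle, hwf⟩ := ih w₁ low col hw₁s (by omega)
      refine ⟨w, hws, pvMle_trans hw₁m hwm, by omega, ?_⟩
      intro f c₀ hf
      have hstep : dbody g f low col (c₀, u) d = (c₀ + (fc u : Int) - (fc w₁ : Int), w₁) := by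
        unfold dbody
        rw [if_pos ⟨hq1, hq2, hq3, hq4, hq5, hq6⟩]
        rw [hw₁f f (c₀ + 1) (by omega)]
        have : max (c₀ + 1 + (fc u : Int) - (fc w₁ : Int) - 1) c₀
            = c₀ + (fc u : Int) - (fc w₁ : Int) := by omega
        simp only [this]
      rw [List.foldl_cons, hstep, hwf f _ hf]
      have : c₀ + (fc u : Int) - (fc w₁ : Int) + (fc w₁ : Int) - (fc w : Int)
          = c₀ + (fc u : Int) - (fc w : Int) := by omega
      rw [this]
    · obtain ⟨w, hws, hwm, hwle, hwf⟩ := ih u low col hs hk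
      refine ⟨w, hws, hwm, hwle, ?_⟩
      intro f c₀ hf
      have hstep : dbody g f low col (c₀, u) d = (c₀, u) := by
        unfold dbody
        rw [if_neg hQ]
      rw [List.foldl_cons, hstep, hwf f c₀ hf]

theorem pvDfs_main (g : List (List Int)) :
    ∀ (n : Nat) (v : List (List Bool)) (low col : Int),
      Shape v g.length (g.headD []).length → InR g (low, col) →
      matGet v low col = false → fc v ≤ n →
      ∃ w, Shape w g.length (g.headD []).length ∧ Mle v w ∧ fc w < fc v ∧
        ∀ (fuel : Nat) (count : Int), fc v ≤ fuel →
          dfsA g fuel low col v count = (count + (fc v : Int) - (fc w : Int) - 1, w) := by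
  intro n
  induction n with
  | zero =>
    intro v low col hs hin hun hle
    obtain ⟨hr, hc⟩ := pvBounds g v hs (low, col) hin
    have := pvFc_pos v low col hr hc hun
    omega
  | succ n ih =>
    intro v low col hs hin hun hle
    obtain ⟨hr, hc⟩ := pvBounds g v hs (low, col) hin
    have hpos := pvFc_pos v low col hr hc hun
    have hfc1 : fc (matSet v low col) + 1 = fc v := pvFc_matSet_eq v low col hr hc hun
    have hs1 := pvShape_matSet v low col g.length (g.headD []).length hs
    obtain ⟨w, hws, hwm, hwle, hwf⟩ :=
      pvFold_char g n (fc (matSet v low col)) (by omega) ih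
        [(1,0),(-1,0),(0,1),(0,-1)] (matSet v low col) low col hs1 (le_refl _)
    refine ⟨w, hws, pvMle_trans (pvMle_matSet v low col) hwm, by omega, ?_⟩
    intro fuel count hfuel
    obtain ⟨f, rfl⟩ : ∃ f, fuel = f + 1 := ⟨fuel - 1, by omega⟩
    rw [pvDfsA_succ, hwf f count (by omega)]
    have : count + (fc (matSet v low col) : Int) - (fc w : Int)
        = count + (fc v : Int) - (fc w : Int) - 1 := by omega
    rw [this]

-- B-side loop lemmas --------------------------------------------------------
def pushP (g : List (List Int)) (v1 : List (List Bool)) : Int × Int → Bool := fun q =>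
  decide (0 ≤ q.1 ∧ q.1 < (g.length : Int) ∧ 0 ≤ q.2 ∧ q.2 < ((g.headD []).length : Int))
    && !matGet v1 q.1 q.2 && decide (gridGet g q.1 q.2 = 1)

theorem pvLoopB_nil (g : List (List Int)) (f : Nat) (v : List (List Bool)) (a : Int) :
    loopB g f [] v a = (a, v) := by cases f <;> rfl

theorem pvLoopB_cons (g : List (List Int)) (f : Nat) (r c : Int) (stack : List (Int × Int))
    (v : List (List Bool)) (a : Int) :
    loopB g (f + 1) ((r, c) :: stack) v a =
      if matGet v r c then loopB g f stack v a
      else loopB g f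
        ((([(r, c-1), (r, c+1), (r-1, c), (r+1, c)] : List (Int × Int)).filter
            (pushP g (matSet v r c))).reverse ++ stack)
        (matSet v r c) (a + 1) := rfl

theorem pvPushP_spec (g : List (List Int)) (v1 : List (List Bool)) (q : Int × Int)
    (h : pushP g v1 q = true) :
    InR g q ∧ matGet v1 q.1 q.2 = false ∧ gridGet g q.1 q.2 = 1 := by
  unfold pushP at h
  simp only [Bool.and_eq_true, decide_eq_true_eq, Bool.not_eq_true'] at h
  exact ⟨h.1.1, h.1.2, h.2⟩

theorem pvPushP_true (g : List (List Int)) (v1 : List (List Bool)) (q : Int × Int)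
    (h1 : InR g q) (h2 : matGet v1 q.1 q.2 = false) (h3 : gridGet g q.1 q.2 = 1) :
    pushP g v1 q = true := by
  unfold pushP
  simp only [Bool.and_eq_true, decide_eq_true_eq, Bool.not_eq_true']
  exact ⟨⟨h1, h2⟩, h3⟩

theorem pvB1 (g : List (List Int)) :
    ∀ (N : Nat) (stack : List (Int × Int)) (v : List (List Bool)) (a : Int) (f₁ f₂ : Nat),
      (∀ p ∈ stack, InR g p) → Shape v g.length (g.headD []).length →
      stack.length + 5 * fc v ≤ N → stack.length + 5 * fc v ≤ f₁ →
      stack.length + 5 * fc v ≤ f₂ →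
      loopB g f₁ stack v a = loopB g f₂ stack v a := by
  intro N
  induction N with
  | zero =>
    intro stack v a f₁ f₂ hst hs hN h1 h2
    have : stack = [] := by
      cases stack with
      | nil => rfl
      | cons p t => simp at hN
    subst this
    rw [pvLoopB_nil, pvLoopB_nil]
  | succ N ih =>
    intro stack v a f₁ f₂ hst hs hN h1 h2
    match stack with
    | [] => rw [pvLoopB_nil, pvLoopB_nil]
    | (r, c) :: st =>
      have hin : InR g (r, c) := hst _ (List.mem_cons_self ..)
      obtain ⟨k₁, rfl⟩ : ∃ k, f₁ = k + 1 := ⟨f₁ - 1, by simp at h1; omega⟩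
      obtain ⟨k₂, rfl⟩ : ∃ k, f₂ = k + 1 := ⟨f₂ - 1, by simp at h2; omega⟩
      rw [pvLoopB_cons, pvLoopB_cons]
      by_cases hv : matGet v r c
      · rw [if_pos hv, if_pos hv]
        exact ih st v a k₁ k₂ (fun p hp => hst _ (List.mem_cons_of_mem _ hp)) hs
          (by simp at hN; omega) (by simp at h1; omega) (by simp at h2; omega)
      · rw [if_neg hv, if_neg hv]
        have hun : matGet v r c = false := by
          cases hmg : matGet v r c
          · rfl
          · exact absurd hmg hv
        obtain ⟨hr, hc⟩ := pvBounds g v hs (r, c) hin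
        have hfc : fc (matSet v r c) + 1 = fc v := pvFc_matSet_eq v r c hr hc hun
        have hlenps : (([(r, c-1), (r, c+1), (r-1, c), (r+1, c)] : List (Int × Int)).filter
            (pushP g (matSet v r c))).reverse.length ≤ 4 := by
          rw [List.length_reverse]
          calc _ ≤ ([(r, c-1), (r, c+1), (r-1, c), (r+1, c)] : List (Int × Int)).length :=
            List.length_filter_le _ _
          _ = 4 := rfl
        apply ih
        · intro p hp
          rcases List.mem_append.1 hp with hp | hp
          · exact (pvPushP_spec g _ p (List.mem_filter.1 (List.mem_reverse.1 hp)).2).1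
          · exact hst _ (List.mem_cons_of_mem _ hp)
        · exact pvShape_matSet v r c _ _ hs
        · simp only [List.length_append]
          simp at hN
          omega
        · simp only [List.length_append]
          simp at h1
          omega
        · simp only [List.length_append]
          simp at h2
          omega

theorem pvStepS_facts (g : List (List Int)) :
    ∀ (l : List (Int × Int)) (a : Int) (v : List (List Bool)),
      (∀ p ∈ l, InR g p) → Shape v g.length (g.headD []).length →
      Shape (List.foldl (stepS g) (a, v) l).2 g.length (g.headD []).length ∧
        fc (List.foldl (stepS g) (a, v) l).2 ≤ fc v := by
  intro l
  induction l with
  | nil => intro a v _ hs; exact ⟨hs, le_refl _⟩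
  | cons s l ih =>
    intro a v hl hs
    rw [List.foldl_cons]
    by_cases hv : matGet v s.1 s.2
    · have : stepS g (a, v) s = (a, v) := by unfold stepS; rw [if_pos hv]
      rw [this]
      exact ih a v (fun p hp => hl _ (List.mem_cons_of_mem _ hp)) hs
    · have hun : matGet v s.1 s.2 = false := by
        cases hmg : matGet v s.1 s.2
        · rfl
        · exact absurd hmg hv
      obtain ⟨w, hws, hwm, hwlt, hwf⟩ := pvDfs_main g (fc v) v s.1 s.2 hs
        (hl _ (List.mem_cons_self ..)) hun (le_refl _)
      have : stepS g (a, v) s = (a + (fc v : Int) - (fc w : Int), w) := by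
        unfold stepS
        rw [if_neg hv, hwf (fc v) (a + 1) (le_refl _)]
        have : a + 1 + (fc v : Int) - (fc w : Int) - 1 = a + (fc v : Int) - (fc w : Int) := by omega
        rw [this]
      rw [this]
      have := ih (a + (fc v : Int) - (fc w : Int)) w
        (fun p hp => hl _ (List.mem_cons_of_mem _ hp)) hws
      exact ⟨this.1, by omega⟩

-- correspondence: A's neighbour fold = B's filtered push list ----------------
theorem pvCorr_gen (g : List (List Int)) (r c : Int) (v1 : List (List Bool)) :
    ∀ (ds : List (Int × Int)) (u : List (List Bool)) (c₀ : Int) (f : Nat),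
      Shape u g.length (g.headD []).length → Mle v1 u → fc u ≤ fc v1 → fc v1 ≤ f →
      List.foldl (dbody g f r c) (c₀, u) ds
        = List.foldl (stepS g) (c₀, u)
            ((ds.map (fun d => (d.1 + r, d.2 + c))).filter (pushP g v1)) := by
  intro ds
  induction ds with
  | nil => intro u c₀ f _ _ _ _; rfl
  | cons d ds ih =>
    intro u c₀ f hs hm hfc hf
    rw [List.foldl_cons, List.map_cons]
    by_cases hF : pushP g v1 (d.1 + r, d.2 + c) = true
    · rw [List.filter_cons_of_pos hF]
      obtain ⟨hin, hun1, hg1⟩ := pvPushP_spec g v1 _ hF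
      by_cases hu : matGet u (d.1 + r) (d.2 + c)
      · have hskipA : dbody g f r c (c₀, u) d = (c₀, u) := by
          unfold dbody
          rw [if_neg (by
            intro hQ
            rw [hQ.2.2.2.2.1] at hu
            exact Bool.false_ne_true hu)]
        have hskipB : stepS g (c₀, u) (d.1 + r, d.2 + c) = (c₀, u) := by
          unfold stepS; rw [if_pos hu]
        rw [hskipA, List.foldl_cons, hskipB]
        exact ih u c₀ f hs hm hfc hf
      · have hun : matGet u (d.1 + r) (d.2 + c) = false := by
          cases hmg : matGet u (d.1 + r) (d.2 + c)
          · rfl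
          · exact absurd hmg hu
        obtain ⟨hi1, hi2, hi3, hi4⟩ := hin
        obtain ⟨w₁, hw₁s, hw₁m, hw₁lt, hw₁f⟩ :=
          pvDfs_main g (fc u) u (d.1 + r) (d.2 + c) hs ⟨hi1, hi2, hi3, hi4⟩ hun (le_refl _)
        have hstepA : dbody g f r c (c₀, u) d = (c₀ + (fc u : Int) - (fc w₁ : Int), w₁) := by
          unfold dbody
          rw [if_pos ⟨hi1, by omega, hi3, by omega, hun, hg1⟩]
          rw [hw₁f f (c₀ + 1) (by omega)]
          have : max (c₀ + 1 + (fc u : Int) - (fc w₁ : Int) - 1) c₀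
              = c₀ + (fc u : Int) - (fc w₁ : Int) := by omega
          simp only [this]
        have hstepB : stepS g (c₀, u) (d.1 + r, d.2 + c)
            = (c₀ + (fc u : Int) - (fc w₁ : Int), w₁) := by
          unfold stepS
          rw [if_neg hu, hw₁f (fc u) (c₀ + 1) (le_refl _)]
          have : c₀ + 1 + (fc u : Int) - (fc w₁ : Int) - 1
              = c₀ + (fc u : Int) - (fc w₁ : Int) := by omega
          rw [this]
        rw [hstepA, List.foldl_cons, hstepB]
        exact ih w₁ _ f hw₁s (pvMle_trans hm hw₁m) (by omega) hf
    · rw [List.filter_cons_of_neg (by simpa using hF)]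
      have hskipA : dbody g f r c (c₀, u) d = (c₀, u) := by
        unfold dbody
        rw [if_neg (by
          intro hQ
          obtain ⟨hq1, hq2, hq3, hq4, hq5, hq6⟩ := hQ
          apply hF
          apply pvPushP_true g v1 _ ⟨hq1, by omega, hq3, by omega⟩ _ hq6
          cases hv1 : matGet v1 (d.1 + r) (d.2 + c)
          · rfl
          · rw [hm _ _ hv1] at hq5
            exact absurd hq5 (by simp))]
      rw [hskipA]
      exact ih u c₀ f hs hm hfc hf

theorem pvCorr (g : List (List Int)) (r c : Int) (v : List (List Bool))
    (hs : Shape v g.length (g.headD []).length) (hin : InR g (r, c))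
    (hun : matGet v r c = false) (a : Int) :
    dfsA g (fc v) r c v (a + 1)
      = List.foldl (stepS g) (a + 1, matSet v r c)
          ((([(r, c-1), (r, c+1), (r-1, c), (r+1, c)] : List (Int × Int)).filter
              (pushP g (matSet v r c))).reverse) := by
  obtain ⟨hr, hc⟩ := pvBounds g v hs (r, c) hin
  have hpos := pvFc_pos v r c hr hc hun
  have hfc1 : fc (matSet v r c) + 1 = fc v := pvFc_matSet_eq v r c hr hc hun
  obtain ⟨k, hk⟩ : ∃ k, fc v = k + 1 := ⟨fc v - 1, by omega⟩
  rw [hk, pvDfsA_succ]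
  rw [pvCorr_gen g r c (matSet v r c) [(1,0),(-1,0),(0,1),(0,-1)] (matSet v r c) (a + 1) k
    (pvShape_matSet v r c _ _ hs) (pvMle_refl _) (le_refl _) (by omega)]
  congr 1
  have e1 : (1:Int) + r = r + 1 := by ring
  have e2 : (-1:Int) + r = r - 1 := by ring
  have e3 : (0:Int) + c = c := by ring
  have e4 : (1:Int) + c = c + 1 := by ring
  have e5 : (-1:Int) + c = c - 1 := by ring
  have e6 : (0:Int) + r = r := by ring
  have hmap : (([(1,0),(-1,0),(0,1),(0,-1)] : List (Int × Int)).map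
      (fun d => (d.1 + r, d.2 + c)))
      = [(r+1, c), (r-1, c), (r, c+1), (r, c-1)] := by
    simp only [List.map_cons, List.map_nil, e1, e2, e3, e4, e5, e6]
  rw [hmap, ← List.filter_reverse]
  rfl

-- B's stack loop folds stepS over the worklist ------------------------------
theorem pvG (g : List (List Int)) :
    ∀ (N : Nat) (l st : List (Int × Int)) (v : List (List Bool)) (a : Int) (f : Nat),
      (∀ p ∈ l, InR g p) → (∀ p ∈ st, InR g p) → Shape v g.length (g.headD []).length →
      l.length + 5 * fc v ≤ N → (l ++ st).length + 5 * fc v ≤ f →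
      loopB g f (l ++ st) v a
        = loopB g f st (List.foldl (stepS g) (a, v) l).2 (List.foldl (stepS g) (a, v) l).1 := by
  intro N
  induction N with
  | zero =>
    intro l st v a f hl hst hs hN hf
    have : l = [] := by
      cases l with
      | nil => rfl
      | cons p t => simp at hN
    subst this
    rfl
  | succ N ih =>
    intro l st v a f hl hst hs hN hf
    match l with
    | [] => rfl
    | (r, c) :: l' =>
      have hin : InR g (r, c) := hl _ (List.mem_cons_self ..)
      obtain ⟨k, rfl⟩ : ∃ k, f = k + 1 := ⟨f - 1, by simp at hf; omega⟩
      rw [List.cons_append, pvLoopB_cons]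
      by_cases hv : matGet v r c
      · rw [if_pos hv]
        have hq : List.foldl (stepS g) (a, v) ((r, c) :: l')
            = List.foldl (stepS g) (a, v) l' := by
          rw [List.foldl_cons]
          have : stepS g (a, v) (r, c) = (a, v) := by unfold stepS; rw [if_pos hv]
          rw [this]
        rw [hq]
        have hmain := ih l' st v a k (fun p hp => hl _ (List.mem_cons_of_mem _ hp)) hst hs
          (by simp at hN; omega) (by simp at hf ⊢; omega)
        rw [hmain]
        obtain ⟨hqs, hqfc⟩ := pvStepS_facts g l' a v
          (fun p hp => hl _ (List.mem_cons_of_mem _ hp)) hs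
        exact pvB1 g (st.length + 5 * fc v) st _ _ k (k + 1) hst hqs
          (by omega) (by simp at hf; omega) (by simp at hf; omega)
      · rw [if_neg hv]
        have hun : matGet v r c = false := by
          cases hmg : matGet v r c
          · rfl
          · exact absurd hmg hv
        obtain ⟨hr, hc⟩ := pvBounds g v hs (r, c) hin
        have hfc1 : fc (matSet v r c) + 1 = fc v := pvFc_matSet_eq v r c hr hc hun
        set ps := (([(r, c-1), (r, c+1), (r-1, c), (r+1, c)] : List (Int × Int)).filter
            (pushP g (matSet v r c))).reverse with hps
        have hlenps : ps.length ≤ 4 := by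
          rw [hps, List.length_reverse]
          calc _ ≤ ([(r, c-1), (r, c+1), (r-1, c), (r+1, c)] : List (Int × Int)).length :=
            List.length_filter_le _ _
          _ = 4 := rfl
        have hpsin : ∀ p ∈ ps, InR g p := by
          intro p hp
          exact (pvPushP_spec g _ p (List.mem_filter.1 (List.mem_reverse.1 hp)).2).1
        rw [← List.append_assoc]
        have hmain := ih (ps ++ l') st (matSet v r c) (a + 1) k
          (by
            intro p hp
            rcases List.mem_append.1 hp with hp | hp
            · exact hpsin _ hp
            · exact hl _ (List.mem_cons_of_mem _ hp))
          hst (pvShape_matSet v r c _ _ hs)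
          (by simp at hN ⊢; omega)
          (by simp at hf ⊢; omega)
        rw [hmain, List.foldl_append]
        have hseed : List.foldl (stepS g) (a + 1, matSet v r c) ps
            = stepS g (a, v) (r, c) := by
          rw [hps, ← pvCorr g r c v hs hin hun a]
          unfold stepS
          rw [if_neg hv]
        have hrw : List.foldl (stepS g) (a, v) ((r, c) :: l')
            = List.foldl (stepS g) (stepS g (a, v) (r, c)) l' := rfl
        rw [hseed, ← hrw]
        obtain ⟨hqs, hqfc⟩ := pvStepS_facts g ((r, c) :: l') a v hl hs
        exact pvB1 g (st.length + 5 * fc v) st _ _ k (k + 1) hst hqs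
          (by omega) (by simp at hf; omega) (by simp at hf; omega)

-- assembling the two solutions ----------------------------------------------
def lamA (g : List (List Int)) (i : Int) :
    Int × List (List Bool) → Int → Int × List (List Bool) := fun st j =>
  if gridGet g j i = 1 ∧ matGet st.2 j i = false then
    let r := dfsA g (g.length * (g.headD []).length + 1) j i st.2 1
    (st.1 + r.1, r.2)
  else st

def lamB (g : List (List Int)) (i : Int) :
    Int × List (List Bool) → Int → Int × List (List Bool) := fun st j =>
  if gridGet g j i = 1 ∧ matGet st.2 j i = false then
    loopB g (5 * (g.length * (g.headD []).length) + 1) [(j, i)] st.2 st.1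
  else st

theorem pvSolutionA_eq (land : List (List Int)) :
    solution land = (PySem.List.pyRange 0 ((land.headD []).length : Int) 1).foldl
      (fun result i =>
        let p := (PySem.List.pyRange 0 (land.length : Int) 1).foldl (lamA land i)
          ((0 : Int), List.replicate land.length (List.replicate (land.headD []).length false))
        max p.1 result) 0 := rfl

theorem pvSolutionB_eq (land : List (List Int)) :
    solution_alt land = (PySem.List.pyRange 0 ((land.headD []).length : Int) 1).foldl
      (fun best i =>
        let p := (PySem.List.pyRange 0 (land.length : Int) 1).foldl (lamB land i)
          ((0 : Int), List.replicate land.length (List.replicate (land.headD []).length false))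
        if p.1 > best then p.1 else best) 0 := rfl

theorem pvCol (g : List (List Int)) (i : Int) (hi : 0 ≤ i ∧ i < ((g.headD []).length : Int)) :
    ∀ (js : List Int), (∀ j ∈ js, 0 ≤ j ∧ j < (g.length : Int)) →
    ∀ (st : Int × List (List Bool)), Shape st.2 g.length (g.headD []).length →
      List.foldl (lamA g i) st js = List.foldl (lamB g i) st js := by
  intro js
  induction js with
  | nil => intro _ st _; rfl
  | cons j js ih =>
    intro hjs st hs
    have hj := hjs j (List.mem_cons_self ..)
    rw [List.foldl_cons, List.foldl_cons]
    by_cases hg : gridGet g j i = 1 ∧ matGet st.2 j i = false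
    · have hin : InR g (j, i) := ⟨hj.1, hj.2, hi.1, hi.2⟩
      obtain ⟨w, hws, hwm, hwlt, hwf⟩ := pvDfs_main g (fc st.2) st.2 j i hs hin hg.2 (le_refl _)
      have hfcle : fc st.2 ≤ g.length * (g.headD []).length := pvFc_le st.2 _ _ hs
      have hA : lamA g i st j = (st.1 + (fc st.2 : Int) - (fc w : Int), w) := by
        unfold lamA
        rw [if_pos hg, hwf (g.length * (g.headD []).length + 1) 1 (by omega)]
        have : st.1 + (1 + (fc st.2 : Int) - (fc w : Int) - 1)
            = st.1 + (fc st.2 : Int) - (fc w : Int) := by omega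
        simp only [this]
      have hB : lamB g i st j = (st.1 + (fc st.2 : Int) - (fc w : Int), w) := by
        unfold lamB
        rw [if_pos hg]
        have hseed : ([(j, i)] : List (Int × Int)) = [(j, i)] ++ [] := by simp
        rw [hseed]
        rw [pvG g (1 + 5 * fc st.2) [(j, i)] [] st.2 st.1
          (5 * (g.length * (g.headD []).length) + 1)
          (by intro p hp; simp at hp; subst hp; exact hin)
          (by intro p hp; simp at hp)
          hs
          (by have h1 : ([(j, i)] : List (Int × Int)).length = 1 := rfl; omega)
          (by have h1 : (([(j, i)] : List (Int × Int)) ++ []).length = 1 := rfl; omega)]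
        rw [pvLoopB_nil]
        have hq : List.foldl (stepS g) (st.1, st.2) [(j, i)]
            = (st.1 + (fc st.2 : Int) - (fc w : Int), w) := by
          rw [List.foldl_cons, List.foldl_nil]
          unfold stepS
          rw [if_neg (by rw [hg.2]; exact Bool.false_ne_true), hwf (fc st.2) (st.1 + 1) (le_refl _)]
          have : st.1 + 1 + (fc st.2 : Int) - (fc w : Int) - 1
              = st.1 + (fc st.2 : Int) - (fc w : Int) := by omega
          rw [this]
        rw [hq]
      rw [hA, hB]
      exact ih (fun p hp => hjs _ (List.mem_cons_of_mem _ hp)) _ hws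
    · have hA : lamA g i st j = st := by unfold lamA; rw [if_neg hg]
      have hB : lamB g i st j = st := by unfold lamB; rw [if_neg hg]
      rw [hA, hB]
      exact ih (fun p hp => hjs _ (List.mem_cons_of_mem _ hp)) _ hs

theorem pvOuter (g : List (List Int)) :
    ∀ (is : List Int), (∀ i ∈ is, 0 ≤ i ∧ i < ((g.headD []).length : Int)) →
    ∀ (acc : Int),
      is.foldl (fun result i =>
        let p := (PySem.List.pyRange 0 (g.length : Int) 1).foldl (lamA g i)
          ((0 : Int), List.replicate g.length (List.replicate (g.headD []).length false))
        max p.1 result) acc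
      = is.foldl (fun best i =>
        let p := (PySem.List.pyRange 0 (g.length : Int) 1).foldl (lamB g i)
          ((0 : Int), List.replicate g.length (List.replicate (g.headD []).length false))
        if p.1 > best then p.1 else best) acc := by
  intro is
  induction is with
  | nil => intro _ _; rfl
  | cons i is ih =>
    intro his acc
    rw [List.foldl_cons, List.foldl_cons]
    have hcol : (PySem.List.pyRange 0 (g.length : Int) 1).foldl (lamA g i)
          ((0 : Int), List.replicate g.length (List.replicate (g.headD []).length false))
        = (PySem.List.pyRange 0 (g.length : Int) 1).foldl (lamB g i)
          ((0 : Int), List.replicate g.length (List.replicate (g.headD []).length false)) := by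
      apply pvCol g i (his i (List.mem_cons_self ..))
      · intro j hj
        have := (PySem.List.mem_pyRange_one).1 hj
        exact ⟨this.1, this.2⟩
      · exact pvShape_init g
    simp only [hcol]
    have hmax : ∀ (x y : Int), max x y = if x > y then x else y := by
      intro x y
      by_cases h : x > y
      · rw [if_pos h, max_eq_left (by omega)]
      · rw [if_neg h, max_eq_right (by omega)]
    rw [hmax]
    exact ih (fun p hp => his _ (List.mem_cons_of_mem _ hp)) _

-- ===== VERDICT (by name: the statement is the Claim_ definition above) =====
theorem solution_spec : Claim_equal_solution := by
  unfold Claim_equal_solution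
  intro land hdom hpre
  unfold Spec_solution
  rw [pvSolutionA_eq, pvSolutionB_eq]
  apply pvOuter land
  intro i hi
  have := (PySem.List.mem_pyRange_one).1 hi
  exact ⟨this.1, this.2⟩
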